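-- pv_equiv track=rewrite | github.com/ai-kmu/etc | algorithm/2023/0510_2556_Disconnect_Path_in_a_Binary_Matrix_by_at_Most_One_Flip/Sungsik.py | isPossibleToCutPath
-- ===== SOURCE A (Python) =====
-- from typing import List
--
-- def isPossibleToCutPath(grid: List[List[int]]) -> bool:
--     m, n = len(grid), len(grid[0])
--     if m == 1 and n <= 2:
--         return False
--     # 가능한 모든 path들 중에서 서로 겹치지 않는 path 쌍이 존재한다면 이는 False
--     # 그렇지 않다면 True
--     # 그렇다고 가능한 모든 path들을 구하고 모두 겹치는지 확인하는 것은 시간이 오래 걸림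
--     # 따라서 오른쪽이 우선인 path와 아래쪽이 우선인 path 2개만 구해서 겹치는지만 확인해도 됨
--     grid[0][0] = 0
--     dirs = [(0, 1), (1, 0)]
--     answer = 0
--
--     def dfs(y, x, path):
--         if y == m - 1 and x == n - 1:
--             return path, True
--         for dy, dx in dirs:
--             new_y, new_x = y + dy, x + dx
--             if new_y < m and new_x < n and grid[new_y][new_x]:
--                 grid[new_y][new_x] = 0
--                 new_path, result = dfs(new_y, new_x, path)
--                 grid[new_y][new_x] = 1
--                 if result:
--                     new_path.append((new_y, new_x))
--                     return new_path, True
--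
--         return path, False
--
--     first_path, _ = dfs(0, 0, [])
--     first_path = set(first_path)
--     dirs = dirs[::-1]
--     second_path, _ = dfs(0, 0, [])
--     second_path = set(second_path)
--
--     # 마지막 위치가 무조건 겹치므로 안겹치는지 확인하기 위해 개수를 1과 비교
--     return len(first_path & second_path) != 1
-- ===== SOURCE B (Python) =====
-- from typing import List
--
-- def isPossibleToCutPath(grid: List[List[int]]) -> bool:
--     m, n = len(grid), len(grid[0])
--     if m == 1 and n <= 2:
--         return False
--     # good[y][x]: (y,x) can reach (m-1,n-1) moving right/down through nonzero cells
--     good = [[False] * n for _ in range(m)]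
--     for y in range(m - 1, -1, -1):
--         for x in range(n - 1, -1, -1):
--             if y == m - 1 and x == n - 1:
--                 good[y][x] = True
--             else:
--                 good[y][x] = ((x + 1 < n and bool(grid[y][x + 1]) and good[y][x + 1])
--                               or (y + 1 < m and bool(grid[y + 1][x]) and good[y + 1][x]))
--
--     def walk(prefer_right):
--         # greedy walk along good cells; returns the set of visited cells (start excluded)
--         path = set()
--         if not good[0][0]:
--             return path
--         y, x = 0, 0
--         while not (y == m - 1 and x == n - 1):
--             if prefer_right:
--                 if x + 1 < n and grid[y][x + 1] and good[y][x + 1]: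
--                     x += 1
--                 else:
--                     y += 1
--             else:
--                 if y + 1 < m and grid[y + 1][x] and good[y + 1][x]:
--                     y += 1
--                 else:
--                     x += 1
--             path.add((y, x))
--         return path
--
--     return len(walk(True) & walk(False)) != 1
-- ===== Notes on version B (the rewrite author's own statement) =====
-- stated objective: alternative
-- what changed: A's two backtracking DFS passes (with cell restore on failure) are replaced by one bottom-up reachability table plus two greedy walks that follow exactly the right-first and down-first success paths.
-- outside the precondition, e.g. on isPossibleToCutPath([[0, 0], [0]]): A returns True, B raises IndexError
import Mathlib
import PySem

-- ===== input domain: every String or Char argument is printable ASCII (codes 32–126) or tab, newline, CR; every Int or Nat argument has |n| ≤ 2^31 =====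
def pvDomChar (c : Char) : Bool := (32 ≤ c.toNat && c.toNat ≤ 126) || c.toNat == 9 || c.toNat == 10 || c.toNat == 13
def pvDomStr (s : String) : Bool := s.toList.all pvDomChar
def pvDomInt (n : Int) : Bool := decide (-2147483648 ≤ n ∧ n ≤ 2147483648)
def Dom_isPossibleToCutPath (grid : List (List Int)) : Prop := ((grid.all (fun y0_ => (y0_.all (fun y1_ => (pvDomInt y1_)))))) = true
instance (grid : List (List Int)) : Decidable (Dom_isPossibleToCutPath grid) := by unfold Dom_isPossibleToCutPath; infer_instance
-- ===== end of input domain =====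

-- B replaces A's backtracking DFS passes (restore-on-fail) by a bottom-up reachability
-- table plus two greedy walks; equivalence is about the RETURN value only
-- (A mutates grid in place: it zeroes grid[0][0] and restores visited cells to 1).

-- ===== PORT A =====
-- grid[y][x] read / write; all of A's accesses are bounds-checked with 0 ≤ index, and
-- Pre_ rules out rows shorter than the first row, so the defaulted forms are exact here.
def pvCell (g : List (List Int)) (y x : Int) : Int :=
  PySem.List.pyGetD (PySem.List.pyGetD g y []) x 0

def pvSetCell (g : List (List Int)) (y x : Int) (v : Int) : List (List Int) :=
  PySem.List.pySetD g y (PySem.List.pySetD (PySem.List.pyGetD g y []) x v)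

-- A's recursive dfs; the fuel only makes the recursion total: every level increases y+x by
-- one, so the call in isPossibleToCutPath passes fuel m+n, which is never exhausted.
mutual
def pvDfs (fuel : Nat) (dirs : List (Int × Int)) (m n : Int) (g : List (List Int))
    (y x : Int) (path : List (Int × Int)) : List (List Int) × List (Int × Int) × Bool :=
  match fuel with
  | 0 => (g, path, false)
  | Nat.succ f =>
    if y = m - 1 ∧ x = n - 1 then (g, path, true)
    else pvDfsTry f dirs dirs m n g y x path
  termination_by (fuel, 0)

def pvDfsTry (fuel : Nat) (dirs ds : List (Int × Int)) (m n : Int) (g : List (List Int))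
    (y x : Int) (path : List (Int × Int)) : List (List Int) × List (Int × Int) × Bool :=
  match ds with
  | [] => (g, path, false)
  | (dy, dx) :: rest =>
    let ny := y + dy
    let nx := x + dx
    if ny < m ∧ nx < n ∧ pvCell g ny nx ≠ 0 then
      let r := pvDfs fuel dirs m n (pvSetCell g ny nx 0) ny nx path
      let g2 := pvSetCell r.1 ny nx 1
      if r.2.2 then (g2, r.2.1 ++ [(ny, nx)], true)
      else pvDfsTry fuel dirs rest m n g2 y x path
    else pvDfsTry fuel dirs rest m n g y x path
  termination_by (fuel, ds.length + 1)
end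

def isPossibleToCutPath (grid : List (List Int)) : Bool :=
  let m : Int := grid.length
  let n : Int := (PySem.List.pyGetD grid 0 []).length   -- len(grid[0]); grid ≠ [] by Pre_
  if m = 1 ∧ n ≤ 2 then false
  else
    let g0 := pvSetCell grid 0 0 0                      -- grid[0][0] = 0
    let dirs : List (Int × Int) := [(0, 1), (1, 0)]
    let fuel := grid.length + (PySem.List.pyGetD grid 0 []).length
    let r1 := pvDfs fuel dirs m n g0 0 0 []
    let s1 := PySem.Set.ofList r1.2.1                   -- set(first_path)
    let r2 := pvDfs fuel dirs.reverse m n r1.1 0 0 []   -- dirs[::-1], mutated grid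
    let s2 := PySem.Set.ofList r2.2.1
    decide (PySem.Set.len (PySem.Set.inter s1 s2) ≠ 1)

-- ===== PORT B =====
def pvCellN (g : List (List Int)) (y x : Nat) : Int := (g.getD y []).getD x 0

def pvGoodAt (t : List (List Bool)) (y x : Nat) : Bool := (t.getD y []).getD x false

-- good row y, computed right to left (B's inner loop); `last` ↔ y = m-1
def pvGoodRow (n x : Nat) (last : Bool) (gRow gBelow : List Int) (goodBelow : List Bool) :
    List Bool :=
  if _h : x < n then
    let rest := pvGoodRow n (x + 1) last gRow gBelow goodBelow
    (if last ∧ x = n - 1 then true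
     else ((decide (x + 1 < n) && decide (gRow.getD (x + 1) 0 ≠ 0) && rest.headD false)
        || (!last && decide (gBelow.getD x 0 ≠ 0) && goodBelow.getD x false))) :: rest
  else []
  termination_by n - x

-- good table, built bottom row first (B's outer loop over y = m-1 … 0)
def pvGoodTable (n : Nat) : List (List Int) → List (List Bool)
  | [] => []
  | r :: rest =>
    let below := pvGoodTable n rest
    pvGoodRow n 0 rest.isEmpty r (rest.headD []) (below.headD []) :: below

-- one step of B's greedy walk
def pvStep (g : List (List Int)) (t : List (List Bool)) (m n : Nat) (pr : Bool) (y x : Nat) :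
    Nat × Nat :=
  if pr then
    if x + 1 < n ∧ pvCellN g y (x + 1) ≠ 0 ∧ pvGoodAt t y (x + 1) then (y, x + 1) else (y + 1, x)
  else
    if y + 1 < m ∧ pvCellN g (y + 1) x ≠ 0 ∧ pvGoodAt t (y + 1) x then (y + 1, x) else (y, x + 1)

def pvWalk (fuel : Nat) (pr : Bool) (m n : Nat) (g : List (List Int)) (t : List (List Bool))
    (y x : Nat) (path : PySem.Set (Int × Int)) : PySem.Set (Int × Int) :=
  match fuel with
  | 0 => path
  | Nat.succ f =>
    if y = m - 1 ∧ x = n - 1 then path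
    else
      let c := pvStep g t m n pr y x
      pvWalk f pr m n g t c.1 c.2 (PySem.Set.add path ((c.1 : Int), (c.2 : Int)))

def isPossibleToCutPath_alt (grid : List (List Int)) : Bool :=
  let m := grid.length
  let n := (grid.headD []).length
  if m = 1 ∧ n ≤ 2 then false
  else
    let t := pvGoodTable n grid
    let p1 := if pvGoodAt t 0 0 then pvWalk (m + n) true m n grid t 0 0 PySem.Set.empty
              else PySem.Set.empty
    let p2 := if pvGoodAt t 0 0 then pvWalk (m + n) false m n grid t 0 0 PySem.Set.empty
              else PySem.Set.empty
    decide (PySem.Set.len (PySem.Set.inter p1 p2) ≠ 1)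

-- ===== PRECONDITION & SPEC =====
-- Pre_ excludes the empty grid (A raises IndexError on grid[0]) and ragged grids — an empty
-- first row alongside further rows, or any row shorter than the first — on which A's
-- bounds checks use len(grid[0]) and can raise IndexError (and B's table walk likewise).
def Pre_isPossibleToCutPath (grid : List (List Int)) : Prop :=
  grid ≠ [] ∧ (grid.length = 1 ∨ (grid.headD []).length ≠ 0) ∧
    ∀ r ∈ grid, (grid.headD []).length ≤ r.length

instance (grid : List (List Int)) : Decidable (Pre_isPossibleToCutPath grid) := by
  unfold Pre_isPossibleToCutPath; infer_instance

def pvWitness_isPossibleToCutPath : List (List Int) := [[1, 1], [1, 1]]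

def Spec_isPossibleToCutPath (grid : List (List Int)) (out : Bool) : Prop :=
  out = isPossibleToCutPath_alt grid
instance (grid : List (List Int)) (out : Bool) : Decidable (Spec_isPossibleToCutPath grid out) := by
  unfold Spec_isPossibleToCutPath; infer_instance

-- ===== CLAIM (what is proved, stated in full; the proofs are below) =====
def Claim_equal_isPossibleToCutPath : Prop :=
  ∀ (grid : List (List Int)), Dom_isPossibleToCutPath grid →
    Pre_isPossibleToCutPath grid →
    Spec_isPossibleToCutPath grid (isPossibleToCutPath grid)

-- ===== LEMMAS AND PROOFS =====

-- grid access helpers -------------------------------------------------------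

theorem pvCell_natCast (g : List (List Int)) (y x : Nat) :
    pvCell g (y : Int) (x : Int) = pvCellN g y x := by
  simp [pvCell, pvCellN, PySem.List.pyGetD_natCast]

theorem pvSetCell_natCast (g : List (List Int)) (y x : Nat) (v : Int) :
    pvSetCell g (y : Int) (x : Int) v = g.set y ((g.getD y []).set x v) := by
  simp [pvSetCell, PySem.List.pySetD_natCast, PySem.List.pyGetD_natCast]

theorem pvCellN_in_range (g : List (List Int)) (y x : Nat) (h : pvCellN g y x ≠ 0) :
    y < g.length ∧ x < (g.getD y []).length := by
  by_contra hc
  rw [not_and_or] at hc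
  unfold pvCellN at h
  rcases hc with hy | hx
  · rw [List.getD_eq_default _ _ (Nat.le_of_not_lt hy)] at h; simp at h
  · exact h (List.getD_eq_default _ _ (Nat.le_of_not_lt hx))

theorem pvCellN_set_ne (g : List (List Int)) (y x i j : Nat) (v : Int)
    (h : ¬(i = y ∧ j = x)) :
    pvCellN (g.set y ((g.getD y []).set x v)) i j = pvCellN g i j := by
  unfold pvCellN
  simp only [List.getD_eq_getElem?_getD]
  by_cases hiy : i = y
  · subst hiy
    have hjx : j ≠ x := fun hj => h ⟨rfl, hj⟩
    by_cases hy : i < g.length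
    · rw [List.getElem?_set_self hy]
      simp only [Option.getD_some]
      rw [List.getElem?_set_ne (Ne.symm hjx)]
    · rw [List.set_eq_of_length_le (Nat.le_of_not_lt hy)]
  · rw [List.getElem?_set_ne (Ne.symm hiy)]

theorem pvCellN_set_self (g : List (List Int)) (y x : Nat) (v : Int)
    (hy : y < g.length) (hx : x < (g.getD y []).length) :
    pvCellN (g.set y ((g.getD y []).set x v)) y x = v := by
  unfold pvCellN
  simp only [List.getD_eq_getElem?_getD]
  rw [List.getElem?_set_self hy]
  simp only [Option.getD_some]
  rw [List.getElem?_set_self (by rwa [List.getD_eq_getElem?_getD] at hx)]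
  simp

-- good-table characterisation ------------------------------------------------

theorem pvGoodRow_oob (n x : Nat) (l : Bool) (gR gB : List Int) (gb : List Bool)
    (h : n ≤ x) : pvGoodRow n x l gR gB gb = [] := by
  rw [pvGoodRow]; simp [Nat.not_lt.mpr h]

theorem pvGoodRow_cons (n x : Nat) (l : Bool) (gR gB : List Int) (gb : List Bool)
    (h : x < n) : pvGoodRow n x l gR gB gb =
      (if l ∧ x = n - 1 then true
       else ((decide (x + 1 < n) && decide (gR.getD (x + 1) 0 ≠ 0)
                && (pvGoodRow n (x + 1) l gR gB gb).headD false)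
          || (!l && decide (gB.getD x 0 ≠ 0) && gb.getD x false)))
        :: pvGoodRow n (x + 1) l gR gB gb := by
  rw [pvGoodRow]; simp [h]

theorem pvGoodRow_length (n x : Nat) (l : Bool) (gR gB : List Int) (gb : List Bool) :
    (pvGoodRow n x l gR gB gb).length = n - x := by
  by_cases h : x < n
  · rw [pvGoodRow_cons n x l gR gB gb h, List.length_cons,
        pvGoodRow_length n (x + 1) l gR gB gb]
    omega
  · rw [pvGoodRow_oob n x l gR gB gb (Nat.le_of_not_lt h)]
    simp; omega
  termination_by n - x

theorem pvGoodRow_getD_shift (n : Nat) (l : Bool) (gR gB : List Int) (gb : List Bool) :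
    ∀ (k x : Nat), (pvGoodRow n x l gR gB gb).getD k false
      = (pvGoodRow n (x + k) l gR gB gb).headD false := by
  intro k
  induction k with
  | zero =>
    intro x
    rw [Nat.add_zero]
    cases pvGoodRow n x l gR gB gb <;> simp
  | succ k ih =>
    intro x
    by_cases h : x < n
    · rw [pvGoodRow_cons n x l gR gB gb h, List.getD_cons_succ, ih (x + 1)]
      congr 2
      omega
    · rw [pvGoodRow_oob n x l gR gB gb (Nat.le_of_not_lt h),
          pvGoodRow_oob n (x + (k + 1)) l gR gB gb (by omega)]
      simp

theorem pvGoodTable_length (n : Nat) (rs : List (List Int)) :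
    (pvGoodTable n rs).length = rs.length := by
  induction rs with
  | nil => rfl
  | cons r rest ih => simp [pvGoodTable, ih]

theorem pvGoodTable_row_length (n : Nat) (rs : List (List Int)) :
    ∀ row ∈ pvGoodTable n rs, row.length = n := by
  induction rs with
  | nil => simp [pvGoodTable]
  | cons r rest ih =>
    intro row hrow
    rcases List.mem_cons.mp hrow with h | h
    · subst h; simp [pvGoodRow_length]
    · exact ih row h

theorem pvGetD_zero_headD {α : Type} (l : List α) (d : α) : l.getD 0 d = l.headD d := by
  cases l <;> rfl

theorem pvGoodAt_in_range (n : Nat) (rs : List (List Int)) (y x : Nat)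
    (h : pvGoodAt (pvGoodTable n rs) y x = true) : y < rs.length ∧ x < n := by
  by_contra hc
  rw [not_and_or] at hc
  unfold pvGoodAt at h
  rcases hc with hy | hx
  · have h1 : (pvGoodTable n rs).getD y [] = [] :=
      List.getD_eq_default _ _ (show (pvGoodTable n rs).length ≤ y by
        rw [pvGoodTable_length]; exact Nat.le_of_not_lt hy)
    rw [h1] at h
    simp at h
  · rcases Nat.lt_or_ge y (pvGoodTable n rs).length with hy2 | hy2
    · have hmem : (pvGoodTable n rs).getD y [] ∈ pvGoodTable n rs := by
        rw [List.getD_eq_getElem?_getD, List.getElem?_eq_getElem hy2]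
        exact List.getElem_mem hy2
      have h1 : ((pvGoodTable n rs).getD y []).getD x false = false :=
        List.getD_eq_default _ _ (by
          rw [pvGoodTable_row_length n rs _ hmem]; exact Nat.le_of_not_lt hx)
      rw [h1] at h
      simp at h
    · have h1 : (pvGoodTable n rs).getD y [] = [] := List.getD_eq_default _ _ hy2
      rw [h1] at h
      simp at h

theorem pvGoodAt_head (n : Nat) (r : List Int) (rest : List (List Int)) (z : Nat) :
    pvGoodAt (pvGoodTable n (r :: rest)) 0 z
      = (pvGoodRow n z rest.isEmpty r (rest.headD []) ((pvGoodTable n rest).headD [])).headD false := by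
  have h := pvGoodRow_getD_shift n rest.isEmpty r (rest.headD []) ((pvGoodTable n rest).headD []) z 0
  rw [Nat.zero_add] at h
  simp only [pvGoodAt, pvGoodTable, List.getD_cons_zero]
  exact h

theorem pvGoodAt_succ (n : Nat) (r : List Int) (rest : List (List Int)) (y z : Nat) :
    pvGoodAt (pvGoodTable n (r :: rest)) (y + 1) z = pvGoodAt (pvGoodTable n rest) y z := by
  simp only [pvGoodAt, pvGoodTable, List.getD_cons_succ]

theorem pvGoodAt_spec (n : Nat) :
    ∀ (rs : List (List Int)) (y x : Nat), y < rs.length → x < n →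
      pvGoodAt (pvGoodTable n rs) y x =
        (decide (y = rs.length - 1 ∧ x = n - 1)
         || (decide (x + 1 < n) && decide (pvCellN rs y (x + 1) ≠ 0)
              && pvGoodAt (pvGoodTable n rs) y (x + 1))
         || (decide (y + 1 < rs.length) && decide (pvCellN rs (y + 1) x ≠ 0)
              && pvGoodAt (pvGoodTable n rs) (y + 1) x)) := by
  intro rs
  induction rs with
  | nil => intro y x hy _; simp at hy
  | cons r rest ih =>
    intro y x hy hx
    simp only [List.length_cons]
    cases y with
    | zero =>
      rw [pvGoodAt_head n r rest x, pvGoodRow_cons _ _ _ _ _ _ hx, List.headD_cons,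
          ← pvGoodAt_head n r rest (x + 1)]
      have hc0 : pvCellN (r :: rest) 0 (x + 1) = r.getD (x + 1) 0 := by
        simp [pvCellN]
      have hc1 : pvCellN (r :: rest) 1 x = (rest.headD []).getD x 0 := by
        cases rest <;> simp [pvCellN]
      have hgb : pvGoodAt (pvGoodTable n (r :: rest)) 1 x
          = ((pvGoodTable n rest).headD []).getD x false := by
        rw [pvGoodAt_succ]
        cases pvGoodTable n rest <;> simp [pvGoodAt]
      rw [hc0, hc1, hgb]
      by_cases hend : rest.isEmpty ∧ x = n - 1
      · have h1 : (0 = rest.length + 1 - 1 ∧ x = n - 1) := by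
          refine ⟨?_, hend.2⟩
          have := hend.1
          rw [List.isEmpty_iff] at this
          simp [this]
        rw [if_pos hend]
        symm
        simp only [Bool.or_eq_true, decide_eq_true_eq]
        exact Or.inl (Or.inl h1)
      · rw [if_neg hend]
        have h1 : ¬(0 = rest.length + 1 - 1 ∧ x = n - 1) := by
          rintro ⟨ha, hb⟩
          exact hend ⟨by rw [List.isEmpty_iff]; exact List.length_eq_zero_iff.mp (by omega), hb⟩
        have hb : (!rest.isEmpty) = decide (0 + 1 < rest.length + 1) := by
          cases rest <;> simp
        rw [hb]
        apply Bool.eq_iff_iff.mpr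
        simp only [Bool.or_eq_true, decide_eq_true_eq]
        tauto
    | succ y' =>
      have hy' : y' < rest.length := by simpa using hy
      have hc : ∀ a b : Nat, pvCellN (r :: rest) (a + 1) b = pvCellN rest a b := by
        intro a b
        simp [pvCellN]
      have e1 : (y' + 1 = rest.length + 1 - 1 ∧ x = n - 1)
          ↔ (y' = rest.length - 1 ∧ x = n - 1) := by omega
      have e2 : (y' + 1 + 1 < rest.length + 1) ↔ (y' + 1 < rest.length) := by omega
      rw [pvGoodAt_succ n r rest y' x, pvGoodAt_succ n r rest y' (x + 1),
          pvGoodAt_succ n r rest (y' + 1) x, hc y' (x + 1), hc (y' + 1) x,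
          ih y' x hy' hx]
      apply Bool.eq_iff_iff.mpr
      simp only [Bool.or_eq_true, Bool.and_eq_true, decide_eq_true_eq]
      rw [e1, e2]

-- the greedy walk as a plain list of cells ------------------------------------

theorem pvStep_sum (g : List (List Int)) (t : List (List Bool)) (m n : Nat) (pr : Bool)
    (y x : Nat) : (pvStep g t m n pr y x).1 + (pvStep g t m n pr y x).2 = y + x + 1 := by
  unfold pvStep; split_ifs <;> simp <;> omega

def pvWlist (g : List (List Int)) (t : List (List Bool)) (m n : Nat) (pr : Bool)
    (y x : Nat) : List (Int × Int) :=
  if _h : y < m ∧ x < n then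
    if y = m - 1 ∧ x = n - 1 then []
    else
      let c := pvStep g t m n pr y x
      ((c.1 : Int), (c.2 : Int)) :: pvWlist g t m n pr c.1 c.2
  else []
  termination_by m + n - (y + x)
  decreasing_by
    have hs := pvStep_sum g t m n pr y x
    omega

theorem pvRowLen_set (g : List (List Int)) (y x : Nat) (v : Int) (i : Nat) :
    ((g.set y ((g.getD y []).set x v)).getD i []).length = (g.getD i []).length := by
  by_cases hiy : i = y
  · subst hiy
    by_cases hy : i < g.length
    · simp only [List.getD_eq_getElem?_getD, List.getElem?_set_self hy, Option.getD_some]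
      simp
    · rw [List.set_eq_of_length_le (Nat.le_of_not_lt hy)]
  · simp only [List.getD_eq_getElem?_getD, List.getElem?_set_ne (Ne.symm hiy)]

theorem pvWlist_nil_oob (g : List (List Int)) (t : List (List Bool)) (m n : Nat) (pr : Bool)
    (y x : Nat) (h : ¬(y < m ∧ x < n)) : pvWlist g t m n pr y x = [] := by
  rw [pvWlist, dif_neg h]

theorem pvWlist_nil_end (g : List (List Int)) (t : List (List Bool)) (m n : Nat) (pr : Bool)
    (y x : Nat) (hb : y < m ∧ x < n) (he : y = m - 1 ∧ x = n - 1) :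
    pvWlist g t m n pr y x = [] := by
  rw [pvWlist, dif_pos hb, if_pos he]

theorem pvWlist_eq_cons (g : List (List Int)) (t : List (List Bool)) (m n : Nat) (pr : Bool)
    (y x : Nat) (hb : y < m ∧ x < n) (he : ¬(y = m - 1 ∧ x = n - 1)) :
    pvWlist g t m n pr y x =
      (((pvStep g t m n pr y x).1 : Int), ((pvStep g t m n pr y x).2 : Int))
        :: pvWlist g t m n pr (pvStep g t m n pr y x).1 (pvStep g t m n pr y x).2 := by
  rw [pvWlist, dif_pos hb, if_neg he]

theorem pvStep_good (n : Nat) (pr : Bool) (rs : List (List Int)) (y x : Nat)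
    (hg : pvGoodAt (pvGoodTable n rs) y x = true)
    (hne : ¬(y = rs.length - 1 ∧ x = n - 1)) :
    pvGoodAt (pvGoodTable n rs)
      (pvStep rs (pvGoodTable n rs) rs.length n pr y x).1
      (pvStep rs (pvGoodTable n rs) rs.length n pr y x).2 = true := by
  obtain ⟨hy, hx⟩ := pvGoodAt_in_range n rs y x hg
  rw [pvGoodAt_spec n rs y x hy hx] at hg
  simp only [Bool.or_eq_true, Bool.and_eq_true, decide_eq_true_eq] at hg
  rcases hg with ((h0 | ⟨⟨hr1, hr2⟩, hr3⟩) | ⟨⟨hd1, hd2⟩, hd3⟩)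
  · exact absurd h0 hne
  · cases pr
    · simp only [pvStep, Bool.false_eq_true, if_false]
      split_ifs with h
      · exact h.2.2
      · exact hr3
    · simp only [pvStep, if_true]
      rw [if_pos ⟨hr1, hr2, hr3⟩]
      exact hr3
  · cases pr
    · simp only [pvStep, Bool.false_eq_true, if_false]
      rw [if_pos ⟨hd1, hd2, hd3⟩]
      exact hd3
    · simp only [pvStep, if_true]
      split_ifs with h
      · exact h.2.2
      · exact hd3

theorem pvWlist_mem_sum (rs : List (List Int)) (t : List (List Bool)) (m n : Nat)
    (pr : Bool) (y x : Nat) (a b : Int)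
    (h : (a, b) ∈ pvWlist rs t m n pr y x) : ((y + x : Nat) : Int) < a + b := by
  by_cases hb2 : y < m ∧ x < n
  · by_cases hend : y = m - 1 ∧ x = n - 1
    · rw [pvWlist_nil_end rs t m n pr y x hb2 hend] at h
      simp at h
    · rw [pvWlist_eq_cons rs t m n pr y x hb2 hend] at h
      have hs := pvStep_sum rs t m n pr y x
      rcases List.mem_cons.mp h with h1 | h1
      · rw [Prod.mk.injEq] at h1
        rw [h1.1, h1.2]
        push_cast
        omega
      · have := pvWlist_mem_sum rs t m n pr
          (pvStep rs t m n pr y x).1 (pvStep rs t m n pr y x).2 a b h1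
        push_cast at this ⊢
        omega
  · rw [pvWlist_nil_oob rs t m n pr y x hb2] at h
    simp at h
  termination_by m + n - (y + x)
  decreasing_by
    have _hs := pvStep_sum rs t m n pr y x
    omega

theorem pvWlist_nodup (rs : List (List Int)) (t : List (List Bool)) (m n : Nat)
    (pr : Bool) (y x : Nat) : (pvWlist rs t m n pr y x).Nodup := by
  by_cases hb2 : y < m ∧ x < n
  · by_cases hend : y = m - 1 ∧ x = n - 1
    · rw [pvWlist_nil_end rs t m n pr y x hb2 hend]
      exact List.nodup_nil
    · rw [pvWlist_eq_cons rs t m n pr y x hb2 hend]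
      refine List.nodup_cons.mpr ⟨?_, pvWlist_nodup rs t m n pr _ _⟩
      intro hmem
      have := pvWlist_mem_sum rs t m n pr
        (pvStep rs t m n pr y x).1 (pvStep rs t m n pr y x).2 _ _ hmem
      push_cast at this
      omega
  · rw [pvWlist_nil_oob rs t m n pr y x hb2]
    exact List.nodup_nil
  termination_by m + n - (y + x)
  decreasing_by
    have hs := pvStep_sum rs t m n pr y x
    omega

theorem pvWalk_update (n : Nat) (pr : Bool) (rs : List (List Int)) :
    ∀ (fuel y x : Nat) (s : PySem.Set (Int × Int)),
      pvGoodAt (pvGoodTable n rs) y x = true →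
      rs.length + n - (y + x) ≤ fuel →
      pvWalk fuel pr rs.length n rs (pvGoodTable n rs) y x s
        = PySem.Set.update s (pvWlist rs (pvGoodTable n rs) rs.length n pr y x) := by
  intro fuel
  induction fuel with
  | zero =>
    intro y x s hg hf
    obtain ⟨hy, hx⟩ := pvGoodAt_in_range n rs y x hg
    omega
  | succ f ih =>
    intro y x s hg hf
    obtain ⟨hy, hx⟩ := pvGoodAt_in_range n rs y x hg
    by_cases hend : y = rs.length - 1 ∧ x = n - 1
    · rw [pvWalk, if_pos hend, pvWlist_nil_end _ _ _ _ _ _ _ ⟨hy, hx⟩ hend,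
          PySem.Set.update_nil]
    · have hgs := pvStep_good n pr rs y x hg hend
      have hs := pvStep_sum rs (pvGoodTable n rs) rs.length n pr y x
      rw [pvWalk, if_neg hend, ih _ _ _ hgs (by omega),
          pvWlist_eq_cons _ _ _ _ _ _ _ ⟨hy, hx⟩ hend, PySem.Set.update_cons]

-- A's dfs computes the good bit and (reversed) greedy walk of the pristine grid ----

theorem pvDfsTry_nil (fuel : Nat) (dirs : List (Int × Int)) (m n : Int)
    (g : List (List Int)) (y x : Int) (path : List (Int × Int)) :
    pvDfsTry fuel dirs [] m n g y x path = (g, path, false) := by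
  rw [pvDfsTry]

theorem pvDfsTry_cons (fuel : Nat) (dirs : List (Int × Int)) (dy dx : Int)
    (rest : List (Int × Int)) (m n : Int) (g : List (List Int)) (y x : Int)
    (path : List (Int × Int)) :
    pvDfsTry fuel dirs ((dy, dx) :: rest) m n g y x path =
      (if y + dy < m ∧ x + dx < n ∧ pvCell g (y + dy) (x + dx) ≠ 0 then
        (if (pvDfs fuel dirs m n (pvSetCell g (y + dy) (x + dx) 0) (y + dy) (x + dx) path).2.2 then
          (pvSetCell (pvDfs fuel dirs m n (pvSetCell g (y + dy) (x + dx) 0) (y + dy) (x + dx) path).1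
              (y + dy) (x + dx) 1,
           (pvDfs fuel dirs m n (pvSetCell g (y + dy) (x + dx) 0) (y + dy) (x + dx) path).2.1
              ++ [(y + dy, x + dx)], true)
         else pvDfsTry fuel dirs rest m n
            (pvSetCell (pvDfs fuel dirs m n (pvSetCell g (y + dy) (x + dx) 0) (y + dy) (x + dx) path).1
                (y + dy) (x + dx) 1) y x path)
       else pvDfsTry fuel dirs rest m n g y x path) := by
  rw [pvDfsTry]

theorem pvDfs_succ (f : Nat) (dirs : List (Int × Int)) (m n : Int)
    (g : List (List Int)) (y x : Int) (path : List (Int × Int)) :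
    pvDfs (f + 1) dirs m n g y x path =
      (if y = m - 1 ∧ x = n - 1 then (g, path, true)
       else pvDfsTry f dirs dirs m n g y x path) := by
  rw [pvDfs]

theorem pvGoodAt_false (n : Nat) (G : List (List Int)) (y x : Nat)
    (hy : y < G.length) (hx : x < n)
    (hend : ¬(y = G.length - 1 ∧ x = n - 1))
    (hr : ¬(x + 1 < n ∧ pvCellN G y (x + 1) ≠ 0
            ∧ pvGoodAt (pvGoodTable n G) y (x + 1) = true))
    (hd : ¬(y + 1 < G.length ∧ pvCellN G (y + 1) x ≠ 0
            ∧ pvGoodAt (pvGoodTable n G) (y + 1) x = true)) :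
    pvGoodAt (pvGoodTable n G) y x = false := by
  rw [Bool.eq_false_iff]
  intro hT
  rw [pvGoodAt_spec n G y x hy hx] at hT
  simp only [Bool.or_eq_true, Bool.and_eq_true, decide_eq_true_eq] at hT
  rcases hT with ((h0 | ⟨⟨a, b⟩, c⟩) | ⟨⟨a, b⟩, c⟩)
  · exact hend h0
  · exact hr ⟨a, b, c⟩
  · exact hd ⟨a, b, c⟩

theorem pvDfs_spec (G : List (List Int)) (n : Nat) (pr : Bool)
    (hm : 0 < G.length) (hn : 0 < n) :
    ∀ (fuel : Nat) (y x : Nat) (g : List (List Int)) (path : List (Int × Int)),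
      y < G.length → x < n →
      (∀ i j : Nat, y + x < i + j → (pvCellN g i j ≠ 0 ↔ pvCellN G i j ≠ 0)) →
      G.length + n - (y + x) ≤ fuel →
      ∃ g',
        pvDfs fuel
            (cond pr [((0 : Int), (1 : Int)), ((1 : Int), (0 : Int))]
                    [((1 : Int), (0 : Int)), ((0 : Int), (1 : Int))])
            (G.length : Int) (n : Int) g (y : Int) (x : Int) path
          = (g',
             path ++ (if pvGoodAt (pvGoodTable n G) y x then
                        (pvWlist G (pvGoodTable n G) G.length n pr y x).reverse
                      else []),
             pvGoodAt (pvGoodTable n G) y x)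
        ∧ (∀ i j : Nat, pvCellN g' i j ≠ 0 ↔ pvCellN g i j ≠ 0)
        ∧ g'.length = g.length
        ∧ (∀ i : Nat, (g'.getD i []).length = (g.getD i []).length) := by
  intro fuel
  induction fuel with
  | zero =>
    intro y x g path hy hx hreg hf
    exact absurd hf (by omega)
  | succ f ih =>
    intro y x g path hy hx hreg hf
    rw [pvDfs_succ]
    by_cases hend : y = G.length - 1 ∧ x = n - 1
    · have hendI : ((y : Int) = (G.length : Int) - 1 ∧ (x : Int) = (n : Int) - 1) :=
        ⟨by omega, by omega⟩
      have hgd : pvGoodAt (pvGoodTable n G) y x = true := by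
        rw [pvGoodAt_spec n G y x hy hx]
        simp only [Bool.or_eq_true, decide_eq_true_eq]
        exact Or.inl (Or.inl hend)
      refine ⟨g, ?_, fun i j => Iff.rfl, rfl, fun i => rfl⟩
      rw [if_pos hendI, hgd,
          pvWlist_nil_end G (pvGoodTable n G) G.length n pr y x ⟨hy, hx⟩ hend]
      simp
    · have hendI : ¬((y : Int) = (G.length : Int) - 1 ∧ (x : Int) = (n : Int) - 1) := by
        intro hc
        exact hend ⟨by omega, by omega⟩
      rw [if_neg hendI]
      have hgdspec := pvGoodAt_spec n G y x hy hx
      have ey : ((y : Int) + 0) = ((y : Nat) : Int) := by ring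
      have ex : ((x : Int) + 0) = ((x : Nat) : Int) := by ring
      have ex1 : ((x : Int) + 1) = (((x + 1 : Nat)) : Int) := by push_cast; ring
      have ey1 : ((y : Int) + 1) = (((y + 1 : Nat)) : Int) := by push_cast; ring
      cases pr with
      | true =>
        simp only [Bool.cond_true] at ih ⊢
        have hmove : ∀ (cy cx : Nat) (g1 : List (List Int)) (path1 : List (Int × Int)),
            cy + cx = y + x + 1 → cy < G.length → cx < n →
            (∀ i j : Nat, y + x < i + j → (pvCellN g1 i j ≠ 0 ↔ pvCellN G i j ≠ 0)) →
            pvCellN g1 cy cx ≠ 0 →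
            ∃ g' : List (List Int),
              pvDfs f [((0 : Int), (1 : Int)), ((1 : Int), (0 : Int))] (G.length : Int) (n : Int)
                  (pvSetCell g1 (cy : Int) (cx : Int) 0) (cy : Int) (cx : Int) path1
                = (g',
                   path1 ++ (if pvGoodAt (pvGoodTable n G) cy cx then
                               (pvWlist G (pvGoodTable n G) G.length n true cy cx).reverse
                             else []),
                   pvGoodAt (pvGoodTable n G) cy cx)
              ∧ (∀ i j : Nat,
                    pvCellN (pvSetCell g' (cy : Int) (cx : Int) 1) i j ≠ 0 ↔ pvCellN g1 i j ≠ 0)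
              ∧ (pvSetCell g' (cy : Int) (cx : Int) 1).length = g1.length
              ∧ (∀ i : Nat,
                    ((pvSetCell g' (cy : Int) (cx : Int) 1).getD i []).length
                      = (g1.getD i []).length) := by
          intro cy cx g1 path1 hsum hcy hcx hreg1 hcell
          obtain ⟨hR1, hR2⟩ := pvCellN_in_range g1 cy cx hcell
          rw [pvSetCell_natCast]
          obtain ⟨g', hEq, hTru, hLen, hRows⟩ :=
            ih cy cx (g1.set cy ((g1.getD cy []).set cx 0)) path1 hcy hcx
              (by
                intro i j hij
                rw [pvCellN_set_ne g1 cy cx i j 0 (by rintro ⟨hi, hj⟩; omega)]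
                exact hreg1 i j (by omega))
              (by omega)
          refine ⟨g', hEq, ?_, ?_, ?_⟩
          · intro i j
            rw [pvSetCell_natCast]
            by_cases hij : i = cy ∧ j = cx
            · obtain ⟨hi, hj⟩ := hij
              subst hi; subst hj
              rw [pvCellN_set_self g' i j 1
                    (by rw [hLen, List.length_set]; exact hR1)
                    (by rw [hRows i, pvRowLen_set g1 i j 0 i]; exact hR2)]
              exact iff_of_true (by norm_num) hcell
            · rw [pvCellN_set_ne g' cy cx i j 1 hij, hTru i j,
                  pvCellN_set_ne g1 cy cx i j 0 hij]
          · rw [pvSetCell_natCast, List.length_set, hLen, List.length_set]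
          · intro i
            rw [pvSetCell_natCast, pvRowLen_set g' cy cx 1 i, hRows i,
                pvRowLen_set g1 cy cx 0 i]
        have hdir2 : ∀ (g2 : List (List Int)),
            (∀ i j : Nat, pvCellN g2 i j ≠ 0 ↔ pvCellN g i j ≠ 0) →
            g2.length = g.length →
            (∀ i : Nat, (g2.getD i []).length = (g.getD i []).length) →
            ¬(x + 1 < n ∧ pvCellN G y (x + 1) ≠ 0
              ∧ pvGoodAt (pvGoodTable n G) y (x + 1) = true) →
            ∃ g'' : List (List Int),
              pvDfsTry f [((0 : Int), (1 : Int)), ((1 : Int), (0 : Int))]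
                  [((1 : Int), (0 : Int))] (G.length : Int) (n : Int) g2 (y : Int) (x : Int) path
                = (g'',
                   path ++ (if pvGoodAt (pvGoodTable n G) y x then
                              (pvWlist G (pvGoodTable n G) G.length n true y x).reverse
                            else []),
                   pvGoodAt (pvGoodTable n G) y x)
              ∧ (∀ i j : Nat, pvCellN g'' i j ≠ 0 ↔ pvCellN g i j ≠ 0)
              ∧ g''.length = g.length
              ∧ (∀ i : Nat, (g''.getD i []).length = (g.getD i []).length) := by
          intro g2 hg2 hg2L hg2R hRightBad
          rw [pvDfsTry_cons]
          simp only [ex, ey1, pvCell_natCast, Nat.cast_lt]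
          by_cases hc2 : y + 1 < G.length ∧ pvCellN g2 (y + 1) x ≠ 0
          · rw [if_pos ⟨hc2.1, hx, hc2.2⟩]
            have hGdown : pvCellN G (y + 1) x ≠ 0 :=
              (hreg (y + 1) x (by omega)).mp ((hg2 (y + 1) x).mp hc2.2)
            obtain ⟨g3, hEq3, hTru3, hLen3, hRows3⟩ :=
              hmove (y + 1) x g2 path (by omega) hc2.1 hx
                (fun i j hij => (hg2 i j).trans (hreg i j hij)) hc2.2
            rw [hEq3]
            dsimp only
            cases hgd2 : pvGoodAt (pvGoodTable n G) (y + 1) x with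
            | true =>
              have hgdyx : pvGoodAt (pvGoodTable n G) y x = true := by
                rw [hgdspec]
                simp only [Bool.or_eq_true, Bool.and_eq_true, decide_eq_true_eq]
                exact Or.inr ⟨⟨hc2.1, hGdown⟩, hgd2⟩
              have hstep : pvStep G (pvGoodTable n G) G.length n true y x = (y + 1, x) := by
                simp only [pvStep, if_true]
                rw [if_neg (fun hrt => hRightBad ⟨hrt.1, hrt.2.1, hrt.2.2⟩)]
              have hW : pvWlist G (pvGoodTable n G) G.length n true y x
                  = ((((y + 1 : Nat)) : Int), ((x : Nat) : Int))
                    :: pvWlist G (pvGoodTable n G) G.length n true (y + 1) x := by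
                rw [pvWlist_eq_cons G (pvGoodTable n G) G.length n true y x ⟨hy, hx⟩ hend,
                    hstep]
              refine ⟨pvSetCell g3 (((y + 1 : Nat)) : Int) ((x : Nat) : Int) 1, ?_,
                fun i j => (hTru3 i j).trans (hg2 i j), hLen3.trans hg2L,
                fun i => (hRows3 i).trans (hg2R i)⟩
              simp only [reduceIte, hgdyx, hW, List.reverse_cons, List.append_assoc]
            | false =>
              have hDownBad : ¬(y + 1 < G.length ∧ pvCellN G (y + 1) x ≠ 0
                  ∧ pvGoodAt (pvGoodTable n G) (y + 1) x = true) := by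
                intro hb
                have := hb.2.2
                rw [hgd2] at this
                exact absurd this (by decide)
              have hgdyx : pvGoodAt (pvGoodTable n G) y x = false :=
                pvGoodAt_false n G y x hy hx hend hRightBad hDownBad
              rw [pvDfsTry_nil]
              refine ⟨pvSetCell g3 (((y + 1 : Nat)) : Int) ((x : Nat) : Int) 1, ?_,
                fun i j => (hTru3 i j).trans (hg2 i j), hLen3.trans hg2L,
                fun i => (hRows3 i).trans (hg2R i)⟩
              rw [hgdyx]
              simp
          · rw [if_neg (fun hfull => hc2 ⟨hfull.1, hfull.2.2⟩)]
            rw [pvDfsTry_nil]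
            have hDownBad : ¬(y + 1 < G.length ∧ pvCellN G (y + 1) x ≠ 0
                ∧ pvGoodAt (pvGoodTable n G) (y + 1) x = true) := by
              intro hb
              exact hc2 ⟨hb.1, (hg2 (y + 1) x).mpr ((hreg (y + 1) x (by omega)).mpr hb.2.1)⟩
            have hgdyx : pvGoodAt (pvGoodTable n G) y x = false :=
              pvGoodAt_false n G y x hy hx hend hRightBad hDownBad
            refine ⟨g2, ?_, hg2, hg2L, hg2R⟩
            rw [hgdyx]
            simp
        rw [pvDfsTry_cons]
        simp only [ey, ex1, pvCell_natCast, Nat.cast_lt]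
        by_cases hc1 : x + 1 < n ∧ pvCellN g y (x + 1) ≠ 0
        · rw [if_pos ⟨hy, hc1.1, hc1.2⟩]
          have hGright : pvCellN G y (x + 1) ≠ 0 := (hreg y (x + 1) (by omega)).mp hc1.2
          obtain ⟨g2, hEq2, hTru2, hLen2, hRows2⟩ :=
            hmove y (x + 1) g path (by omega) hy hc1.1 hreg hc1.2
          rw [hEq2]
          dsimp only
          cases hgd1 : pvGoodAt (pvGoodTable n G) y (x + 1) with
          | true =>
            have hgdyx : pvGoodAt (pvGoodTable n G) y x = true := by
              rw [hgdspec]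
              simp only [Bool.or_eq_true, Bool.and_eq_true, decide_eq_true_eq]
              exact Or.inl (Or.inr ⟨⟨hc1.1, hGright⟩, hgd1⟩)
            have hstep : pvStep G (pvGoodTable n G) G.length n true y x = (y, x + 1) := by
              simp only [pvStep, if_true]
              rw [if_pos ⟨hc1.1, hGright, hgd1⟩]
            have hW : pvWlist G (pvGoodTable n G) G.length n true y x
                = (((y : Nat) : Int), (((x + 1 : Nat)) : Int))
                  :: pvWlist G (pvGoodTable n G) G.length n true y (x + 1) := by
              rw [pvWlist_eq_cons G (pvGoodTable n G) G.length n true y x ⟨hy, hx⟩ hend,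
                  hstep]
            refine ⟨pvSetCell g2 ((y : Nat) : Int) (((x + 1 : Nat)) : Int) 1, ?_,
              hTru2, hLen2, hRows2⟩
            simp only [reduceIte, hgdyx, hW, List.reverse_cons, List.append_assoc]
          | false =>
            rw [if_neg (show ¬(false = true) by decide)]
            exact hdir2 (pvSetCell g2 ((y : Nat) : Int) (((x + 1 : Nat)) : Int) 1)
              hTru2 hLen2 hRows2
              (fun hbad => by
                have := hbad.2.2
                rw [hgd1] at this
                exact absurd this (by decide))
        · rw [if_neg (fun hfull => hc1 ⟨hfull.2.1, hfull.2.2⟩)]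
          exact hdir2 g (fun i j => Iff.rfl) rfl (fun i => rfl)
            (fun hbad => hc1 ⟨hbad.1, (hreg y (x + 1) (by omega)).mpr hbad.2.1⟩)
      | false =>
        simp only [Bool.cond_false] at ih ⊢
        have hmove : ∀ (cy cx : Nat) (g1 : List (List Int)) (path1 : List (Int × Int)),
            cy + cx = y + x + 1 → cy < G.length → cx < n →
            (∀ i j : Nat, y + x < i + j → (pvCellN g1 i j ≠ 0 ↔ pvCellN G i j ≠ 0)) →
            pvCellN g1 cy cx ≠ 0 →
            ∃ g' : List (List Int),
              pvDfs f [((1 : Int), (0 : Int)), ((0 : Int), (1 : Int))] (G.length : Int) (n : Int)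
                  (pvSetCell g1 (cy : Int) (cx : Int) 0) (cy : Int) (cx : Int) path1
                = (g',
                   path1 ++ (if pvGoodAt (pvGoodTable n G) cy cx then
                               (pvWlist G (pvGoodTable n G) G.length n false cy cx).reverse
                             else []),
                   pvGoodAt (pvGoodTable n G) cy cx)
              ∧ (∀ i j : Nat,
                    pvCellN (pvSetCell g' (cy : Int) (cx : Int) 1) i j ≠ 0 ↔ pvCellN g1 i j ≠ 0)
              ∧ (pvSetCell g' (cy : Int) (cx : Int) 1).length = g1.length
              ∧ (∀ i : Nat,
                    ((pvSetCell g' (cy : Int) (cx : Int) 1).getD i []).length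
                      = (g1.getD i []).length) := by
          intro cy cx g1 path1 hsum hcy hcx hreg1 hcell
          obtain ⟨hR1, hR2⟩ := pvCellN_in_range g1 cy cx hcell
          rw [pvSetCell_natCast]
          obtain ⟨g', hEq, hTru, hLen, hRows⟩ :=
            ih cy cx (g1.set cy ((g1.getD cy []).set cx 0)) path1 hcy hcx
              (by
                intro i j hij
                rw [pvCellN_set_ne g1 cy cx i j 0 (by rintro ⟨hi, hj⟩; omega)]
                exact hreg1 i j (by omega))
              (by omega)
          refine ⟨g', hEq, ?_, ?_, ?_⟩
          · intro i j
            rw [pvSetCell_natCast]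
            by_cases hij : i = cy ∧ j = cx
            · obtain ⟨hi, hj⟩ := hij
              subst hi; subst hj
              rw [pvCellN_set_self g' i j 1
                    (by rw [hLen, List.length_set]; exact hR1)
                    (by rw [hRows i, pvRowLen_set g1 i j 0 i]; exact hR2)]
              exact iff_of_true (by norm_num) hcell
            · rw [pvCellN_set_ne g' cy cx i j 1 hij, hTru i j,
                  pvCellN_set_ne g1 cy cx i j 0 hij]
          · rw [pvSetCell_natCast, List.length_set, hLen, List.length_set]
          · intro i
            rw [pvSetCell_natCast, pvRowLen_set g' cy cx 1 i, hRows i,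
                pvRowLen_set g1 cy cx 0 i]
        have hdir2 : ∀ (g2 : List (List Int)),
            (∀ i j : Nat, pvCellN g2 i j ≠ 0 ↔ pvCellN g i j ≠ 0) →
            g2.length = g.length →
            (∀ i : Nat, (g2.getD i []).length = (g.getD i []).length) →
            ¬(y + 1 < G.length ∧ pvCellN G (y + 1) x ≠ 0
              ∧ pvGoodAt (pvGoodTable n G) (y + 1) x = true) →
            ∃ g'' : List (List Int),
              pvDfsTry f [((1 : Int), (0 : Int)), ((0 : Int), (1 : Int))]
                  [((0 : Int), (1 : Int))] (G.length : Int) (n : Int) g2 (y : Int) (x : Int) path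
                = (g'',
                   path ++ (if pvGoodAt (pvGoodTable n G) y x then
                              (pvWlist G (pvGoodTable n G) G.length n false y x).reverse
                            else []),
                   pvGoodAt (pvGoodTable n G) y x)
              ∧ (∀ i j : Nat, pvCellN g'' i j ≠ 0 ↔ pvCellN g i j ≠ 0)
              ∧ g''.length = g.length
              ∧ (∀ i : Nat, (g''.getD i []).length = (g.getD i []).length) := by
          intro g2 hg2 hg2L hg2R hDownBad
          rw [pvDfsTry_cons]
          simp only [ey, ex1, pvCell_natCast, Nat.cast_lt]
          by_cases hc2 : x + 1 < n ∧ pvCellN g2 y (x + 1) ≠ 0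
          · rw [if_pos ⟨hy, hc2.1, hc2.2⟩]
            have hGright : pvCellN G y (x + 1) ≠ 0 :=
              (hreg y (x + 1) (by omega)).mp ((hg2 y (x + 1)).mp hc2.2)
            obtain ⟨g3, hEq3, hTru3, hLen3, hRows3⟩ :=
              hmove y (x + 1) g2 path (by omega) hy hc2.1
                (fun i j hij => (hg2 i j).trans (hreg i j hij)) hc2.2
            rw [hEq3]
            dsimp only
            cases hgd2 : pvGoodAt (pvGoodTable n G) y (x + 1) with
            | true =>
              have hgdyx : pvGoodAt (pvGoodTable n G) y x = true := by
                rw [hgdspec]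
                simp only [Bool.or_eq_true, Bool.and_eq_true, decide_eq_true_eq]
                exact Or.inl (Or.inr ⟨⟨hc2.1, hGright⟩, hgd2⟩)
              have hstep : pvStep G (pvGoodTable n G) G.length n false y x = (y, x + 1) := by
                simp only [pvStep, Bool.false_eq_true, if_false]
                rw [if_neg (fun hdt => hDownBad ⟨hdt.1, hdt.2.1, hdt.2.2⟩)]
              have hW : pvWlist G (pvGoodTable n G) G.length n false y x
                  = (((y : Nat) : Int), (((x + 1 : Nat)) : Int))
                    :: pvWlist G (pvGoodTable n G) G.length n false y (x + 1) := by
                rw [pvWlist_eq_cons G (pvGoodTable n G) G.length n false y x ⟨hy, hx⟩ hend,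
                    hstep]
              refine ⟨pvSetCell g3 ((y : Nat) : Int) (((x + 1 : Nat)) : Int) 1, ?_,
                fun i j => (hTru3 i j).trans (hg2 i j), hLen3.trans hg2L,
                fun i => (hRows3 i).trans (hg2R i)⟩
              simp only [reduceIte, hgdyx, hW, List.reverse_cons, List.append_assoc]
            | false =>
              have hRightBad : ¬(x + 1 < n ∧ pvCellN G y (x + 1) ≠ 0
                  ∧ pvGoodAt (pvGoodTable n G) y (x + 1) = true) := by
                intro hb
                have := hb.2.2
                rw [hgd2] at this
                exact absurd this (by decide)
              have hgdyx : pvGoodAt (pvGoodTable n G) y x = false :=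
                pvGoodAt_false n G y x hy hx hend hRightBad hDownBad
              rw [pvDfsTry_nil]
              refine ⟨pvSetCell g3 ((y : Nat) : Int) (((x + 1 : Nat)) : Int) 1, ?_,
                fun i j => (hTru3 i j).trans (hg2 i j), hLen3.trans hg2L,
                fun i => (hRows3 i).trans (hg2R i)⟩
              rw [hgdyx]
              simp
          · rw [if_neg (fun hfull => hc2 ⟨hfull.2.1, hfull.2.2⟩)]
            rw [pvDfsTry_nil]
            have hRightBad : ¬(x + 1 < n ∧ pvCellN G y (x + 1) ≠ 0
                ∧ pvGoodAt (pvGoodTable n G) y (x + 1) = true) := by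
              intro hb
              exact hc2 ⟨hb.1, (hg2 y (x + 1)).mpr ((hreg y (x + 1) (by omega)).mpr hb.2.1)⟩
            have hgdyx : pvGoodAt (pvGoodTable n G) y x = false :=
              pvGoodAt_false n G y x hy hx hend hRightBad hDownBad
            refine ⟨g2, ?_, hg2, hg2L, hg2R⟩
            rw [hgdyx]
            simp
        rw [pvDfsTry_cons]
        simp only [ey1, ex, pvCell_natCast, Nat.cast_lt]
        by_cases hc1 : y + 1 < G.length ∧ pvCellN g (y + 1) x ≠ 0
        · rw [if_pos ⟨hc1.1, hx, hc1.2⟩]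
          have hGdown : pvCellN G (y + 1) x ≠ 0 := (hreg (y + 1) x (by omega)).mp hc1.2
          obtain ⟨g2, hEq2, hTru2, hLen2, hRows2⟩ :=
            hmove (y + 1) x g path (by omega) hc1.1 hx hreg hc1.2
          rw [hEq2]
          dsimp only
          cases hgd1 : pvGoodAt (pvGoodTable n G) (y + 1) x with
          | true =>
            have hgdyx : pvGoodAt (pvGoodTable n G) y x = true := by
              rw [hgdspec]
              simp only [Bool.or_eq_true, Bool.and_eq_true, decide_eq_true_eq]
              exact Or.inr ⟨⟨hc1.1, hGdown⟩, hgd1⟩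
            have hstep : pvStep G (pvGoodTable n G) G.length n false y x = (y + 1, x) := by
              simp only [pvStep, Bool.false_eq_true, if_false]
              rw [if_pos ⟨hc1.1, hGdown, hgd1⟩]
            have hW : pvWlist G (pvGoodTable n G) G.length n false y x
                = ((((y + 1 : Nat)) : Int), ((x : Nat) : Int))
                  :: pvWlist G (pvGoodTable n G) G.length n false (y + 1) x := by
              rw [pvWlist_eq_cons G (pvGoodTable n G) G.length n false y x ⟨hy, hx⟩ hend,
                  hstep]
            refine ⟨pvSetCell g2 (((y + 1 : Nat)) : Int) ((x : Nat) : Int) 1, ?_,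
              hTru2, hLen2, hRows2⟩
            simp only [reduceIte, hgdyx, hW, List.reverse_cons, List.append_assoc]
          | false =>
            rw [if_neg (show ¬(false = true) by decide)]
            exact hdir2 (pvSetCell g2 (((y + 1 : Nat)) : Int) ((x : Nat) : Int) 1)
              hTru2 hLen2 hRows2
              (fun hbad => by
                have := hbad.2.2
                rw [hgd1] at this
                exact absurd this (by decide))
        · rw [if_neg (fun hfull => hc1 ⟨hfull.1, hfull.2.2⟩)]
          exact hdir2 g (fun i j => Iff.rfl) rfl (fun i => rfl)
            (fun hbad => hc1 ⟨hbad.1, (hreg (y + 1) x (by omega)).mpr hbad.2.1⟩)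

-- final set-length comparison --------------------------------------------------

theorem pvInterLen_reverse (w1 w2 : List (Int × Int)) (h1 : w1.Nodup) (h2 : w2.Nodup) :
    PySem.Set.len (PySem.Set.inter (PySem.Set.ofList w1.reverse) (PySem.Set.ofList w2.reverse))
      = PySem.Set.len (PySem.Set.inter (PySem.Set.ofList w1) (PySem.Set.ofList w2)) := by
  rw [PySem.Set.ofList_eq_self_of_nodup _ (List.nodup_reverse.mpr h1),
      PySem.Set.ofList_eq_self_of_nodup _ (List.nodup_reverse.mpr h2),
      PySem.Set.ofList_eq_self_of_nodup _ h1,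
      PySem.Set.ofList_eq_self_of_nodup _ h2]
  simp only [PySem.Set.inter, PySem.Set.len, PySem.Set.contains]
  rw [show (fun x => w2.reverse.contains x) = (fun x => w2.contains x) from
        funext (fun x => List.contains_reverse),
      List.filter_reverse, List.length_reverse]


-- ===== VERDICT (by name: the statement is the Claim_ definition above) =====
theorem isPossibleToCutPath_spec : Claim_equal_isPossibleToCutPath := by
  intro grid _hDom hPre
  obtain ⟨hne, hn1, hrows⟩ := hPre
  unfold Spec_isPossibleToCutPath isPossibleToCutPath isPossibleToCutPath_alt
  have hget0 : PySem.List.pyGetD grid 0 [] = grid.headD [] := by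
    rw [show ((0 : Int)) = ((0 : Nat) : Int) from rfl, PySem.List.pyGetD_natCast]
    exact pvGetD_zero_headD grid []
  rw [hget0]
  by_cases hsmall : grid.length = 1 ∧ (grid.headD []).length ≤ 2
  · rw [if_pos (show ((grid.length : Int) = 1 ∧ ((grid.headD []).length : Int) ≤ 2) from
        ⟨by exact_mod_cast hsmall.1, by exact_mod_cast hsmall.2⟩),
      if_pos hsmall]
  · rw [if_neg (show ¬((grid.length : Int) = 1 ∧ ((grid.headD []).length : Int) ≤ 2) from
        fun hc => hsmall ⟨by exact_mod_cast hc.1, by exact_mod_cast hc.2⟩),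
      if_neg hsmall]
    dsimp only
    have hm : 0 < grid.length := by
      cases grid with
      | nil => exact absurd rfl hne
      | cons r t => simp
    have hn : 0 < (grid.headD []).length := by
      rcases hn1 with h1 | h1
      · by_contra hc
        exact hsmall ⟨h1, by omega⟩
      · omega
    -- first dfs, right priority
    have hreg0 : ∀ i j : Nat, 0 + 0 < i + j →
        (pvCellN (pvSetCell grid ((0 : Nat) : Int) ((0 : Nat) : Int) 0) i j ≠ 0
          ↔ pvCellN grid i j ≠ 0) := by
      intro i j hij
      rw [pvSetCell_natCast, pvCellN_set_ne grid 0 0 i j 0 (by rintro ⟨hi, hj⟩; omega)]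
    obtain ⟨g1, hEq1, hTru1, _, _⟩ :=
      pvDfs_spec grid (grid.headD []).length true hm hn
        (grid.length + (grid.headD []).length) 0 0
        (pvSetCell grid ((0 : Nat) : Int) ((0 : Nat) : Int) 0) [] hm hn hreg0 (by omega)
    simp only [Bool.cond_true] at hEq1
    obtain ⟨g2, hEq2, _, _, _⟩ :=
      pvDfs_spec grid (grid.headD []).length false hm hn
        (grid.length + (grid.headD []).length) 0 0 g1 [] hm hn
        (fun i j hij => (hTru1 i j).trans (hreg0 i j hij)) (by omega)
    simp only [Bool.cond_false] at hEq2
    simp only [Nat.cast_zero] at hEq1 hEq2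
    rw [show (([((0 : Int), (1 : Int)), ((1 : Int), (0 : Int))]) : List (Int × Int)).reverse
          = [((1 : Int), (0 : Int)), ((0 : Int), (1 : Int))] from rfl]
    rw [hEq1]
    dsimp only
    rw [hEq2]
    dsimp only
    simp only [List.nil_append]
    cases hgd : pvGoodAt (pvGoodTable (grid.headD []).length grid) 0 0 with
    | false =>
      rfl
    | true =>
      simp only [reduceIte]
      rw [pvWalk_update (grid.headD []).length true grid
            (grid.length + (grid.headD []).length) 0 0 PySem.Set.empty hgd (by omega),
          pvWalk_update (grid.headD []).length false grid
            (grid.length + (grid.headD []).length) 0 0 PySem.Set.empty hgd (by omega)]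
      simp only [show ∀ w : List (Int × Int),
            PySem.Set.update PySem.Set.empty w = PySem.Set.ofList w from fun w => rfl]
      rw [pvInterLen_reverse _ _
            (pvWlist_nodup grid (pvGoodTable (grid.headD []).length grid)
              grid.length (grid.headD []).length true 0 0)
            (pvWlist_nodup grid (pvGoodTable (grid.headD []).length grid)
              grid.length (grid.headD []).length false 0 0)]
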